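-- pv_equiv track=rewrite | github.com/sagemath/sage-archive-2023-02-01 | src/sage/rings/polynomial/convolution.py | _forward_butterfly
-- ===== SOURCE A (Python) =====
-- def _forward_butterfly(L1, L2, r):
--    r"""
--    L1 and L2 are both lists of length K, and
--    `0 \leq r \leq K`. They represent polynomials in
--    `S = R[y]/(y^K + 1)`. This function returns
--    `(L_1 + y^r L_2, L_1 - y^r L_2)`, as a list.
--    """
--    assert len(L1) == len(L2)
--    assert 0 <= r <= len(L1)
--
--    K = len(L1)
--    return [L1[i] - L2[i+K-r] for i in range(r)] + \
--           [L1[i] + L2[i-r] for i in range(r, K)], \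
--           [L1[i] + L2[i+K-r] for i in range(r)] + \
--           [L1[i] - L2[i-r] for i in range(r, K)]
-- ===== SOURCE B (Python) =====
-- def _forward_butterfly(L1, L2, r):
--     r"""
--     Butterfly in R[y]/(y^K + 1): returns (L1 + y^r L2, L1 - y^r L2).
--     Scatter formulation: start from two copies of L1 and, in ONE loop over L2,
--     add/subtract each coefficient L2[j] in place at its target slot (j+r) mod K,
--     negating on wrap-around (y^K = -1).
--     """
--     assert len(L1) == len(L2)
--     assert 0 <= r <= len(L1)
--     K = len(L1)
--     plus = list(L1)
--     minus = list(L1)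
--     for j, v in enumerate(L2):
--         p = j + r
--         if p >= K:
--             p -= K
--             plus[p] -= v
--             minus[p] += v
--         else:
--             plus[p] += v
--             minus[p] -= v
--     return plus, minus
-- ===== Notes on version B (the rewrite author's own statement) =====
-- stated objective: alternative
-- what changed: B replaces A's four gather comprehensions (read L2 at a shifted index for each output slot) by a scatter: it copies L1 into two mutable output lists and, in one loop over enumerate(L2), adds/subtracts each L2[j] in place at its target slot (j+r) mod K, negating on wrap-around.
import Mathlib
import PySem

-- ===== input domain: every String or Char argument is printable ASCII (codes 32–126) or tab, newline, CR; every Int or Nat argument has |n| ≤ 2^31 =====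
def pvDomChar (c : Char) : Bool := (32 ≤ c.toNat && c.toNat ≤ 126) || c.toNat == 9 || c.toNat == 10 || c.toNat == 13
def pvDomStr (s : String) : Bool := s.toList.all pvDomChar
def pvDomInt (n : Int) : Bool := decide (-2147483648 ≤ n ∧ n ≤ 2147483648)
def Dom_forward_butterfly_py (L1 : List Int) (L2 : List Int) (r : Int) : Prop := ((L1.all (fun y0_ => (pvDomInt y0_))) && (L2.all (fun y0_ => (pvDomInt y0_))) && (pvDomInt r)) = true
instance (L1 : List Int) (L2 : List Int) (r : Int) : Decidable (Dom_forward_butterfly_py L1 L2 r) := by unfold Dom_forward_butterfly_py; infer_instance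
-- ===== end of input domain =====

-- B is a scatter: it copies L1 into two output lists and, in one loop over
-- enumerate(L2), adds/subtracts each L2[j] in place at slot (j+r) mod K
-- (negated on wrap-around), instead of A's four gather comprehensions.


-- ===== PORT A =====
-- All list indices are in range under Pre_, so xs[i] is ported as pyGetD xs i 0.
def forward_butterfly_py (L1 : List Int) (L2 : List Int) (r : Int) : List Int × List Int :=
  let K : Int := L1.length
  (((PySem.List.pyRange 0 r 1).map
      (fun i => PySem.List.pyGetD L1 i 0 - PySem.List.pyGetD L2 (i + K - r) 0)) ++
   ((PySem.List.pyRange r K 1).map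
      (fun i => PySem.List.pyGetD L1 i 0 + PySem.List.pyGetD L2 (i - r) 0)),
   ((PySem.List.pyRange 0 r 1).map
      (fun i => PySem.List.pyGetD L1 i 0 + PySem.List.pyGetD L2 (i + K - r) 0)) ++
   ((PySem.List.pyRange r K 1).map
      (fun i => PySem.List.pyGetD L1 i 0 - PySem.List.pyGetD L2 (i - r) 0)))

-- ===== PORT B =====
-- Python list assignment plus[p] ±= v is ported as pySetD/pyGetD (index in range under Pre_).
def forward_butterfly_py_alt (L1 : List Int) (L2 : List Int) (r : Int) : List Int × List Int :=
  let K : Int := L1.length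
  (PySem.List.enumerate L2 0).foldl
    (fun st jv =>
      let p := jv.1 + r
      if K ≤ p then
        let q := p - K
        (PySem.List.pySetD st.1 q (PySem.List.pyGetD st.1 q 0 - jv.2),
         PySem.List.pySetD st.2 q (PySem.List.pyGetD st.2 q 0 + jv.2))
      else
        (PySem.List.pySetD st.1 p (PySem.List.pyGetD st.1 p 0 + jv.2),
         PySem.List.pySetD st.2 p (PySem.List.pyGetD st.2 p 0 - jv.2)))
    (L1, L1)

-- ===== PRECONDITION & SPEC =====
-- Pre_ is exactly A's asserts: equal lengths and 0 ≤ r ≤ len(L1); A raises AssertionError otherwise.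
def Pre_forward_butterfly_py (L1 : List Int) (L2 : List Int) (r : Int) : Prop :=
  L1.length = L2.length ∧ 0 ≤ r ∧ r ≤ L1.length
instance (L1 : List Int) (L2 : List Int) (r : Int) : Decidable (Pre_forward_butterfly_py L1 L2 r) := by
  unfold Pre_forward_butterfly_py; infer_instance

def pvWitness_forward_butterfly_py : List Int × List Int × Int := ([1, 2, 3], [4, 5, 6], 2)

def Spec_forward_butterfly_py (L1 : List Int) (L2 : List Int) (r : Int) (out : List Int × List Int) : Prop := out = forward_butterfly_py_alt L1 L2 r
instance (L1 : List Int) (L2 : List Int) (r : Int) (out : List Int × List Int) : Decidable (Spec_forward_butterfly_py L1 L2 r out) := by unfold Spec_forward_butterfly_py; infer_instance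

-- ===== CLAIM (what is proved, stated in full; the proofs are below) =====
def Claim_equal_forward_butterfly_py : Prop := ∀ (L1 : List Int) (L2 : List Int) (r : Int), Dom_forward_butterfly_py L1 L2 r → Pre_forward_butterfly_py L1 L2 r → Spec_forward_butterfly_py L1 L2 r (forward_butterfly_py L1 L2 r)

-- ===== LEMMAS AND PROOFS =====

-- The values one phase of B's scatter loop writes at consecutive slots a, a+1, …,
-- reading the pre-phase list P (each slot is read only before its single write).
def pvWrites (f : Int → Int → Int) (P : List Int) (a : Nat) : List Int → List Int
  | [] => []
  | v :: tl => f (P.getD a 0) v :: pvWrites f P (a + 1) tl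

theorem pvWrites_congr (f : Int → Int → Int) (ys : List Int) :
    ∀ (a : Nat) (P Q : List Int),
      (∀ k, k < ys.length → P.getD (a + k) 0 = Q.getD (a + k) 0) →
      pvWrites f P a ys = pvWrites f Q a ys := by
  induction ys with
  | nil => intro a P Q _; rfl
  | cons v tl ih =>
    intro a P Q h
    simp only [pvWrites]
    have h0 := h 0 (by simp)
    rw [Nat.add_zero] at h0
    rw [h0, ih (a + 1) P Q (fun k hk => by
      have := h (1 + k) (by simp; omega)
      rwa [show a + (1 + k) = a + 1 + k by omega] at this)]

theorem pvWrites_set (f : Int → Int → Int) (ys : List Int) (P : List Int) (i : Nat) (w : Int)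
    (a : Nat) (hia : i < a) : pvWrites f (P.set i w) a ys = pvWrites f P a ys := by
  refine pvWrites_congr f ys a _ _ (fun k _ => ?_)
  simp only [List.getD_eq_getElem?_getD, List.getElem?_set]
  rw [if_neg (by omega : ¬ i = a + k)]

theorem pvWrites_length (f : Int → Int → Int) (ys : List Int) :
    ∀ (a : Nat) (P : List Int), (pvWrites f P a ys).length = ys.length := by
  induction ys with
  | nil => intro a P; rfl
  | cons v tl ih => intro a P; simp [pvWrites, ih]

theorem pvWrites_eq_map (f : Int → Int → Int) (ys : List Int) :
    ∀ (a : Nat) (P : List Int),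
      pvWrites f P a ys
        = (List.range ys.length).map (fun k => f (P.getD (a + k) 0) (ys.getD k 0)) := by
  induction ys with
  | nil => intro a P; rfl
  | cons v tl ih =>
    intro a P
    simp only [pvWrites, List.length_cons, List.range_succ_eq_map, List.map_cons, List.map_map]
    refine congrArg₂ _ (by simp) ?_
    rw [ih (a + 1) P]
    refine List.map_congr_left (fun k _ => ?_)
    simp [Function.comp, Nat.add_comm, Nat.add_left_comm]

theorem pvSplice (P : List Int) (a n : Nat) (w : Int) (W : List Int) (ha : a < P.length) :
    (P.set a w).take (a+1) ++ W ++ (P.set a w).drop (a+1+n)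
      = P.take a ++ (w :: W) ++ P.drop (a+(n+1)) := by
  rw [List.set_eq_take_cons_drop w ha]
  rw [List.take_append, List.drop_append]
  simp [List.take_of_length_le, List.length_take, Nat.min_eq_left (Nat.le_of_lt ha)]
  rw [List.drop_eq_nil_of_le (by simp; omega), show a + 1 + n - a = n + 1 by omega]
  simp [List.drop_drop]
  congr 1; omega

-- One scatter phase: folding a write-at-slot jv.1+off step over enumerate ys s
-- splices the written values into the state lists at slots a..a+len-1, a = (s+off).toNat.
theorem pvPhase (fp fm : Int → Int → Int) (ys : List Int) :
    ∀ (s off : Int) (P M : List Int),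
      0 ≤ s + off → (s + off).toNat + ys.length ≤ P.length →
      (s + off).toNat + ys.length ≤ M.length →
      (PySem.List.enumerate ys s).foldl
        (fun (st : List Int × List Int) jv =>
          (PySem.List.pySetD st.1 (jv.1 + off) (fp (PySem.List.pyGetD st.1 (jv.1 + off) 0) jv.2),
           PySem.List.pySetD st.2 (jv.1 + off) (fm (PySem.List.pyGetD st.2 (jv.1 + off) 0) jv.2)))
        (P, M)
      = (P.take (s + off).toNat ++ pvWrites fp P (s + off).toNat ys
           ++ P.drop ((s + off).toNat + ys.length),
         M.take (s + off).toNat ++ pvWrites fm M (s + off).toNat ys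
           ++ M.drop ((s + off).toNat + ys.length)) := by
  induction ys with
  | nil =>
    intro s off P M h0 hP hM
    simp only [PySem.List.enumerate_nil, List.foldl_nil, pvWrites, List.length_nil,
      Nat.add_zero, List.append_nil, List.take_append_drop]
  | cons v tl ih =>
    intro s off P M h0 hP hM
    rw [PySem.List.enumerate_cons, List.foldl_cons]
    simp only [List.length_cons] at hP hM
    have ha : (0:Int) ≤ s + off := h0
    set a : Nat := (s + off).toNat with hadef
    have haP : a < P.length := by omega
    have haM : a < M.length := by omega
    rw [PySem.List.pySetD_of_nonneg _ _ ha, PySem.List.pySetD_of_nonneg _ _ ha,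
        PySem.List.pyGetD_of_nonneg _ _ ha, PySem.List.pyGetD_of_nonneg _ _ ha]
    set w1 : Int := fp (P.getD a 0) v with hw1
    set w2 : Int := fm (M.getD a 0) v with hw2
    have ha1 : (s + 1 + off).toNat = a + 1 := by omega
    rw [ih (s + 1) off (P.set a w1) (M.set a w2)
        (by omega) (by simp; omega) (by simp; omega)]
    rw [ha1, pvWrites_set fp tl P a w1 (a+1) (by omega),
        pvWrites_set fm tl M a w2 (a+1) (by omega)]
    simp only [pvWrites, List.length_cons, Prod.mk.injEq]
    exact ⟨pvSplice P a tl.length w1 _ haP, pvSplice M a tl.length w2 _ haM⟩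

-- B's value in closed form: phase 1 (no wrap, slots r..K-1 from L2.take (K-r))
-- then phase 2 (wrap, slots 0..r-1 from L2.drop (K-r)).
theorem pvAltEq (L1 L2 : List Int) (r : Int)
    (hlen : L1.length = L2.length) (hr0 : 0 ≤ r) (hrK : r ≤ (L1.length : Int)) :
    forward_butterfly_py_alt L1 L2 r =
      (pvWrites (fun x v => x - v) L1 0 (L2.drop (L1.length - r.toNat))
         ++ pvWrites (fun x v => x + v) L1 r.toNat (L2.take (L1.length - r.toNat)),
       pvWrites (fun x v => x + v) L1 0 (L2.drop (L1.length - r.toNat))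
         ++ pvWrites (fun x v => x - v) L1 r.toNat (L2.take (L1.length - r.toNat))) := by
  have hKn : r.toNat ≤ L1.length := by omega
  set Kn := L1.length with hK
  set rn := r.toNat with hrn
  set m := Kn - rn with hm
  set ys1 := L2.take m with hys1
  set ys2 := L2.drop m with hys2
  have hy1 : ys1.length = m := by simp [hys1]; omega
  have hy2 : ys2.length = rn := by simp [hys2]; omega
  simp only [forward_butterfly_py_alt]
  conv_lhs => rw [← List.take_append_drop m L2]
  rw [PySem.List.enumerate_append, List.foldl_append]
  -- phase 1: no element wraps
  rw [PySem.List.foldl_congr_mem _ _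
      (fun (st : List Int × List Int) (jv : Int × Int) =>
        (PySem.List.pySetD st.1 (jv.1 + r) ((fun x v => x + v) (PySem.List.pyGetD st.1 (jv.1 + r) 0) jv.2),
         PySem.List.pySetD st.2 (jv.1 + r) ((fun x v => x - v) (PySem.List.pyGetD st.2 (jv.1 + r) 0) jv.2)))
      (L1, L1)
      (by
        intro acc jv hjv
        rw [PySem.List.mem_enumerate_iff] at hjv
        obtain ⟨k, hk, rfl⟩ := hjv
        rw [hy1] at hk
        simp only [Int.zero_add]
        rw [if_neg (by omega)])]
  rw [pvPhase (fun x v => x + v) (fun x v => x - v) ys1 0 r L1 L1 (by omega)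
      (by rw [hy1]; omega) (by rw [hy1]; omega)]
  have h0r : ((0 : Int) + r).toNat = rn := by omega
  rw [h0r, hy1, show rn + m = Kn by omega, ← hK, List.drop_length]
  simp only [List.append_nil]
  -- phase 2: every element wraps
  rw [show (0 : Int) + (m : Int) = (m : Int) by ring, ← hys2]
  rw [PySem.List.foldl_congr_mem _ _
      (fun (st : List Int × List Int) (jv : Int × Int) =>
        (PySem.List.pySetD st.1 (jv.1 + (r - (Kn : Int))) ((fun x v => x - v) (PySem.List.pyGetD st.1 (jv.1 + (r - (Kn : Int))) 0) jv.2),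
         PySem.List.pySetD st.2 (jv.1 + (r - (Kn : Int))) ((fun x v => x + v) (PySem.List.pyGetD st.2 (jv.1 + (r - (Kn : Int))) 0) jv.2)))
      _
      (by
        intro acc jv hjv
        rw [PySem.List.mem_enumerate_iff] at hjv
        obtain ⟨k, hk, rfl⟩ := hjv
        rw [hy2] at hk
        rw [if_pos (by omega),
            show ((m : Int) + (k : Int)) + r - (Kn : Int) = ((m : Int) + (k : Int)) + (r - (Kn : Int)) by ring])]
  rw [pvPhase (fun x v => x - v) (fun x v => x + v) ys2 (m : Int) (r - (Kn : Int))
      _ _ (by omega)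
      (by simp [pvWrites_length, hy1, hy2]; omega)
      (by simp [pvWrites_length, hy1, hy2]; omega)]
  have hz : ((m : Int) + (r - (Kn : Int))).toNat = 0 := by omega
  rw [hz, hy2]
  simp only [List.take_zero, List.nil_append, Nat.zero_add]
  have htl : (L1.take rn).length = rn := by simp; omega
  have hdropP : ∀ (W : List Int), (L1.take rn ++ W).drop rn = W := by
    intro W; rw [List.drop_left' htl]
  have hcongr : ∀ (f : Int → Int → Int) (W : List Int),
      pvWrites f (L1.take rn ++ W) 0 ys2 = pvWrites f L1 0 ys2 := by
    intro f W
    refine pvWrites_congr f ys2 0 _ _ (fun k hk => ?_)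
    rw [hy2] at hk
    simp only [Nat.zero_add, List.getD_eq_getElem?_getD]
    rw [List.getElem?_append_left (by omega), List.getElem?_take_of_lt (by omega)]
  rw [hdropP, hdropP, hcongr, hcongr]

-- A's value in the same closed form.
theorem pvAEq (L1 L2 : List Int) (r : Int)
    (hlen : L1.length = L2.length) (hr0 : 0 ≤ r) (hrK : r ≤ (L1.length : Int)) :
    forward_butterfly_py L1 L2 r =
      (pvWrites (fun x v => x - v) L1 0 (L2.drop (L1.length - r.toNat))
         ++ pvWrites (fun x v => x + v) L1 r.toNat (L2.take (L1.length - r.toNat)),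
       pvWrites (fun x v => x + v) L1 0 (L2.drop (L1.length - r.toNat))
         ++ pvWrites (fun x v => x - v) L1 r.toNat (L2.take (L1.length - r.toNat))) := by
  have hKn : r.toNat ≤ L1.length := by omega
  set Kn := L1.length with hK
  set rn := r.toNat with hrn
  set m := Kn - rn with hm
  have hy1 : (L2.take m).length = m := by simp; omega
  have hy2 : (L2.drop m).length = rn := by simp; omega
  have hlo : ∀ (f : Int → Int → Int),
      (PySem.List.pyRange 0 r 1).map
          (fun i => f (PySem.List.pyGetD L1 i 0) (PySem.List.pyGetD L2 (i + (Kn : Int) - r) 0))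
        = pvWrites f L1 0 (L2.drop m) := by
    intro f
    rw [pvWrites_eq_map, hy2, PySem.List.pyRange_one, List.map_map,
        show (r - 0).toNat = rn by omega]
    refine List.map_congr_left (fun k hk => ?_)
    rw [List.mem_range] at hk
    simp only [Function.comp, Int.zero_add]
    rw [PySem.List.pyGetD_natCast,
        show (k : Int) + (Kn : Int) - r = ((m + k : Nat) : Int) by push_cast; omega,
        PySem.List.pyGetD_natCast]
    simp only [Nat.zero_add, List.getD_eq_getElem?_getD, List.getElem?_drop]
  have hhi : ∀ (f : Int → Int → Int),
      (PySem.List.pyRange r (Kn : Int) 1).map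
          (fun i => f (PySem.List.pyGetD L1 i 0) (PySem.List.pyGetD L2 (i - r) 0))
        = pvWrites f L1 rn (L2.take m) := by
    intro f
    rw [pvWrites_eq_map, hy1, PySem.List.pyRange_one, List.map_map,
        show ((Kn : Int) - r).toNat = m by omega]
    refine List.map_congr_left (fun k hk => ?_)
    rw [List.mem_range] at hk
    simp only [Function.comp]
    rw [show r + (k : Int) = ((rn + k : Nat) : Int) by push_cast; omega,
        PySem.List.pyGetD_natCast,
        show ((rn + k : Nat) : Int) - r = ((k : Nat) : Int) by push_cast; omega,
        PySem.List.pyGetD_natCast]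
    simp only [List.getD_eq_getElem?_getD]
    rw [List.getElem?_take_of_lt (by omega)]
  simp only [forward_butterfly_py]
  rw [← hK] at *
  exact Prod.ext (by rw [hlo (fun x v => x - v), hhi (fun x v => x + v)])
    (by rw [hlo (fun x v => x + v), hhi (fun x v => x - v)])

-- ===== VERDICT (by name: the statement is the Claim_ definition above) =====
theorem forward_butterfly_py_spec : Claim_equal_forward_butterfly_py := by
  intro L1 L2 r _ hpre
  obtain ⟨hlen, hr0, hrK⟩ := hpre
  unfold Spec_forward_butterfly_py
  rw [pvAEq L1 L2 r hlen hr0 (by exact_mod_cast hrK),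
      pvAltEq L1 L2 r hlen hr0 (by exact_mod_cast hrK)]
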